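-- pv_equiv track=rewrite | github.com/yacai0412/LILAP_caiya | SNP/same_reads_phasing.py | find_mnp_1
-- ===== SOURCE A (Python) =====
-- def find_mnp_1(pos, snp_dic, ds, de):
--     pos = int(pos)
--     out_pos = [pos]
--     ds = int(ds)
--     de1 = int(de) + 1
--
--     for i in range(ds, de1):
--         pos2 = pos + i
--         if pos2 in snp_dic:
--             out_pos.append(pos2)
--     return out_pos
-- ===== SOURCE B (Python) =====
-- def find_mnp_1(pos, snp_dic, ds, de):
--     pos = int(pos)
--     lower = pos + int(ds)
--     upper = pos + int(de)
--     return [pos] + sorted(k for k in snp_dic if lower <= k <= upper)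
-- ===== Notes on version B (the rewrite author's own statement) =====
-- stated objective: simpler
-- what changed: Instead of scanning every integer offset in range(ds, de+1) with an accumulator loop and testing dict membership, B is a one-liner that filters the dict's keys to the window [pos+ds, pos+de] and sorts them.
import Mathlib
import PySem

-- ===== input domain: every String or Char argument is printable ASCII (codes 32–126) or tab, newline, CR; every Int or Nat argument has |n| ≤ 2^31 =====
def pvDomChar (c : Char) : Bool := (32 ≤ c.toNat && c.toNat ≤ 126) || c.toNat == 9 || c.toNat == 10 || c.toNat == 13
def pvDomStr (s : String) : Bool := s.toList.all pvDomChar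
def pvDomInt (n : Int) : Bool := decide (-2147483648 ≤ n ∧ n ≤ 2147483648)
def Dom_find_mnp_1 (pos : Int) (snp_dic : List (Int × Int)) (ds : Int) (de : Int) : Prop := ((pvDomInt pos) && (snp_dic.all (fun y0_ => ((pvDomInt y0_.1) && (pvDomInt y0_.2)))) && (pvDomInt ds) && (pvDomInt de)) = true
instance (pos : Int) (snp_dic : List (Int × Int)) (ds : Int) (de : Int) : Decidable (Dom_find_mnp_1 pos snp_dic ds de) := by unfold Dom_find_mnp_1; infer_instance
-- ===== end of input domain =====

-- B replaces A's accumulator loop over every integer offset in range(ds, de+1) by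
-- filtering the dict's keys to the window [pos+ds, pos+de] and sorting them
-- (objective: simpler).

-- ===== PORT A =====
def find_mnp_1 (pos : Int) (snp_dic : List (Int × Int)) (ds : Int) (de : Int) : List Int :=
  (PySem.List.pyRange ds (de + 1) 1).foldl
    (fun out_pos i =>
      if decide ((pos + i) ∈ snp_dic.map Prod.fst) then out_pos ++ [pos + i] else out_pos)
    [pos]

-- ===== PORT B =====
def find_mnp_1_alt (pos : Int) (snp_dic : List (Int × Int)) (ds : Int) (de : Int) : List Int :=
  let lower := pos + ds
  let upper := pos + de
  pos :: PySem.List.sorted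
    ((PySem.List.dedup (snp_dic.map Prod.fst)).filter
      (fun k => decide (lower ≤ k) && decide (k ≤ upper)))
    (fun x => x) false

-- ===== PRECONDITION & SPEC =====
def Spec_find_mnp_1 (pos : Int) (snp_dic : List (Int × Int)) (ds : Int) (de : Int) (out : List Int) : Prop := out = find_mnp_1_alt pos snp_dic ds de
instance (pos : Int) (snp_dic : List (Int × Int)) (ds : Int) (de : Int) (out : List Int) : Decidable (Spec_find_mnp_1 pos snp_dic ds de out) := by unfold Spec_find_mnp_1; infer_instance

-- ===== CLAIM (what is proved, stated in full; the proofs are below) =====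
def Claim_equal_find_mnp_1 : Prop := ∀ (pos : Int) (snp_dic : List (Int × Int)) (ds : Int) (de : Int), Dom_find_mnp_1 pos snp_dic ds de → Spec_find_mnp_1 pos snp_dic ds de (find_mnp_1 pos snp_dic ds de)

-- ===== LEMMAS AND PROOFS =====

-- A's loop result, via foldl_append_if: [pos] ++ matching window positions in scan order.
theorem find_mnp_1_eq_filter (pos : Int) (snp_dic : List (Int × Int)) (ds de : Int) :
    find_mnp_1 pos snp_dic ds de =
      pos :: ((PySem.List.pyRange ds (de + 1) 1).filter
          (fun i => decide ((pos + i) ∈ snp_dic.map Prod.fst))).map (fun i => pos + i) := by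
  unfold find_mnp_1
  rw [PySem.List.foldl_append_if]
  rfl

-- The scan-order match list is strictly increasing.
theorem pairwise_lt_matches (pos : Int) (snp_dic : List (Int × Int)) (ds de : Int) :
    (((PySem.List.pyRange ds (de + 1) 1).filter
        (fun i => decide ((pos + i) ∈ snp_dic.map Prod.fst))).map (fun i => pos + i)).Pairwise (· < ·) := by
  refine List.Pairwise.map _ (fun a b h => by omega) ?_
  exact ((PySem.List.pairwise_lt_pyRange_one ds (de + 1)).filter _).imp (fun h => by omega)

-- It is a permutation of the window-filtered distinct keys.
theorem matches_perm (pos : Int) (snp_dic : List (Int × Int)) (ds de : Int) :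
    (((PySem.List.pyRange ds (de + 1) 1).filter
        (fun i => decide ((pos + i) ∈ snp_dic.map Prod.fst))).map (fun i => pos + i)).Perm
      ((PySem.List.dedup (snp_dic.map Prod.fst)).filter
        (fun k => decide (pos + ds ≤ k) && decide (k ≤ pos + de))) := by
  apply (List.perm_ext_iff_of_nodup ?_ ?_).mpr
  · intro x
    simp only [List.mem_map, List.mem_filter, PySem.List.mem_pyRange_one,
      PySem.List.mem_dedup, decide_eq_true_eq, Bool.and_eq_true]
    constructor
    · rintro ⟨i, ⟨⟨h1, h2⟩, hm⟩, rfl⟩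
      exact ⟨hm, by omega, by omega⟩
    · rintro ⟨hm, h1, h2⟩
      exact ⟨x - pos, ⟨⟨by omega, by omega⟩, by simpa using hm⟩, by omega⟩
  · exact (pairwise_lt_matches pos snp_dic ds de).imp (fun h => ne_of_lt h)
  · exact (PySem.List.nodup_dedup _).filter _

-- ===== VERDICT (by name: the statement is the Claim_ definition above) =====
theorem find_mnp_1_spec : Claim_equal_find_mnp_1 := by
  intro pos snp_dic ds de _
  unfold Spec_find_mnp_1 find_mnp_1_alt
  rw [find_mnp_1_eq_filter]
  simp only []
  rw [PySem.List.sorted_eq_of_perm_of_pairwise_lt _ _ _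
    (matches_perm pos snp_dic ds de) (pairwise_lt_matches pos snp_dic ds de)]
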